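/- GENERATED by mk_final_copies.py from the proof of the farm's unit `start_decoder.C4a` (farm:start_decoder.C4a.1: Lemmas.lean) as the
   re-elaboration sweep compiled it — do not edit. -/
import Asan.CheckWalk
import Vorbis.Spec.Reader
import Vorbis.Spec.Units.start_decoder_C4a

open X86 X86.User Asan Vorbis Vorbis.Spec Vorbis.Spec.StartDecoder

set_option maxRecDepth 4000
set_option maxHeartbeats 4000000

namespace Vorbis.Spec.start_decoder_C4a

/-- **The exit `AtC5` of segment C4a** (`j ≥ c->entries` at the loop head: the loop is over): `InC5` with `total = usedCount … j`,
from the loop invariant `InC4` at the segment's entry state `v` with `j = entries`, the ONE `C4.Agree` with the empty array window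
(the pushed return address of the check call), `Bits` (`C4.bits_same`), and the walker's register facts. Pure logic, modelled on
`C4.mid_of_call`. -/
theorem c4a_exit_c5 {u₀ : State} {g : Ghost} {i : Nat} {A2 A3 Ai : Arena} {A : Arena × List Obj} {lengths j : Nat}
    {v w : State} (hat : InC4 u₀ g i A2 A3 Ai A lengths j v) (hjE : (Codebook.entries v.mem (g.cb v.mem i)).toNat = j)
    (hag : C4.Agree g.R g.f A.1.B 0 v.mem w.mem) (hbits : Bits (g.Blk A) g.len w.mem g.f)
    (hrip : w.rip = pc_C5) (hrsp : w.reg .rsp = v.reg .rsp) (hinv : abiInv w)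
    (hbp : w.reg .rbp = v.reg .rbp) (hbx : w.reg .rbx = v.reg .rbx) (h14 : w.reg .r14 = v.reg .r14) :
    AtC5 u₀ g i w := by
  have hfr := hat.frame
  have hcur := hat.cur
  have ha := hcur.sd.arena
  have hb := ha.bounds
  have h1x := ha.AR1x
  have hout := hcur.hand.objOut
  simp only [voff] at hout
  have hobr := hcur.sd.bits.OBR
  simp only [voff] at hobr
  have hglob := hcur.hand.outside ⟨0x120640, 16⟩ (by
    unfold fixedBlocks globalBlocks
    apply List.mem_cons_of_mem
    apply List.mem_cons_of_mem
    apply List.mem_cons_of_mem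
    apply List.mem_cons_of_mem
    exact List.mem_cons_self)
  simp only at hglob
  obtain ⟨hr1, hr2⟩ := hfr.r_eq
  obtain ⟨ha1, ha2, ha3⟩ := hfr.ra
  simp only [steady, depth] at hr1 ha2
  -- the window `[A.1.B, A.1.B + 0)`
  have hLs : A.1.B + 0 ≤ 0x700000 ∨ 0x800000 ≤ A.1.B := by omega
  have hLt : A.1.B + 0 ≤ 0xC00000 := by omega
  have hLf : A.1.B + 0 ≤ g.f ∨ g.f + 1808 ≤ A.1.B := by omega
  have hLa : ∀ B, Ai.Blk B → B.base + B.size ≤ A.1.B ∨ A.1.B + 0 ≤ B.base := by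
    intro B hB
    have hin := arena_inside ha (hB.mono hcur.ages.exti)
    omega
  have hLg : A.1.B + 0 ≤ Vorbis.Globals.log2_4.beg ∨ Vorbis.Globals.log2_4.beg + 16 ≤ A.1.B := by
    simp only [Vorbis.Globals.log2_4]
    omega
  have hfr' : Frame u₀ g pc_C5 A w :=
    C4.frame_carry hfr hcur.hand hobr ha hag hrip hrsp hinv hLs hLt hLf ⟨Nat.le_refl _, by omega⟩ hLg
  have hcur' : Cur g i A2 A3 Ai A w := C4.cur_carry hfr hcur hag hbits h14 hLs hLt hLf hLa
  have ecb : g.cb w.mem i = g.cb v.mem i := C4.cb_carry hfr hcur hag hLf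
  have sf : Codebook.SameFields v.mem w.mem (g.cb v.mem i) := C4.struct_same hcur (C4.kept_carry hfr hcur hag hLa)
  obtain ⟨k1', fresh', place'⟩ := C4.book_carry sf hat.k1 hat.fresh hat.place
  -- the `lengths` array
  obtain ⟨w1, w2, w3, w4⟩ := C4.lengths_where ha (fun B hB => hB.1) hat.place
  rw [hjE] at w2 w3 w4
  have heq : Mem.EqOn lengths (lengths + j) v.mem w.mem := by
    apply hag.eqOn
    · omega
    · omega
    · omega
    · omega
    · omega
    · omega
    · omega
  obtain ⟨lenL', hu'⟩ := C4.lengths_carry heq (by omega) hat.lenL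
  have eent : Codebook.entries w.mem (g.cb w.mem i) = Codebook.entries v.mem (g.cb v.mem i) := by
    rw [ecb, sf.entries]
  have hle := usedCount_le v.mem lengths j
  have hjle := hat.j_le
  refine ⟨A, lengths, usedCount v.mem lengths j, A2, A3, Ai, ?_⟩
  exact
    { frame := hfr'
      cur := hcur'
      k1 := by rw [ecb]; exact k1'
      rbx := hbx.trans hat.rbx
      rbp := hbp.trans hat.rbp
      total_le := by rw [eent]; omega
      lenL := by rw [eent, hjE]; exact lenL'
      place := by rw [ecb]; exact place'
      sparse_total := by
        intro _
        rw [eent, hjE, hu']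
      fresh := by rw [ecb]; exact fresh' }

end Vorbis.Spec.start_decoder_C4a
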